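-- pv_equiv track=rewrite | github.com/bebe-acme/monitorator | hooks/emit_event.py | detect_worktree_info
-- ===== SOURCE A (Python) =====
-- def detect_worktree_info(cwd: str) -> tuple[str, str | None]:
--     """Detect if cwd is inside a worktree directory.
--
--     Checks for:
--     - /.claude/worktrees/<name>  (built-in Claude Code worktrees)
--     - /.worktrees/<name>         (Superpowers plugin / user convention)
--
--     Returns (project_name, worktree_name) where worktree_name is None if not a worktree.
--     """
--     if not cwd:
--         return ("unknown", None)
--     cleaned = cwd.rstrip("/")
--     for marker in ("/.claude/worktrees/", "/.worktrees/"):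
--         idx = cleaned.find(marker)
--         if idx != -1:
--             project = cleaned[:idx].rsplit("/", 1)[-1] or "unknown"
--             worktree = cleaned[idx + len(marker):].split("/", 1)[0]
--             return (project, worktree if worktree else None)
--     return (cleaned.rsplit("/", 1)[-1] or "unknown", None)
-- ===== SOURCE B (Python) =====
-- def detect_worktree_info(cwd: str) -> tuple[str, str | None]:
--     """Detect worktree info by scanning path segments (two ordered passes)
--     instead of substring search + slicing."""
--     if not cwd:
--         return ("unknown", None)
--     segs = cwd.rstrip("/").split("/")
--     for i in range(1, len(segs)):
--         if i + 2 < len(segs) and segs[i] == ".claude" and segs[i + 1] == "worktrees":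
--             return (segs[i - 1] or "unknown", segs[i + 2] or None)
--     for i in range(1, len(segs)):
--         if i + 1 < len(segs) and segs[i] == ".worktrees":
--             return (segs[i - 1] or "unknown", segs[i + 1] or None)
--     return (segs[-1] or "unknown", None)
-- ===== Notes on version B (the rewrite author's own statement) =====
-- stated objective: alternative
-- what changed: B splits the cleaned path into '/'-separated segments once and makes two ordered scans over the segment list (first for .claude/worktrees/<name>, then for .worktrees/<name>), instead of A's substring find() on the raw string followed by slicing, rsplit and split to recover the neighbouring components.
import Mathlib
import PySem

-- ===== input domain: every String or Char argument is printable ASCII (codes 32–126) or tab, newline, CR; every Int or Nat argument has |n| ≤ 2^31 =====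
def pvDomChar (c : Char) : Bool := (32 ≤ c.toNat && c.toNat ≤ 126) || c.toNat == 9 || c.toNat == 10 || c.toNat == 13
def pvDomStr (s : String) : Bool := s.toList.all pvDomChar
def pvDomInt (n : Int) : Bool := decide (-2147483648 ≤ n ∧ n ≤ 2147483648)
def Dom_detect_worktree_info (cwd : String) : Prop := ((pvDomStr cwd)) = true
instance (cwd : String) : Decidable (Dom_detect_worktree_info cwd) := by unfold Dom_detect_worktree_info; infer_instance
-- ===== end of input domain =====

-- B replaces A's substring-search-plus-slicing with two ordered scans over the
-- path's '/'-separated segments (objective: alternative decomposition).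

-- ===== PORT A =====
-- hand-ported primitives PySem lacks (each exact on its use here):
-- s.rstrip("/") = remove all trailing '/' characters
def pvRstripSlash (cs : List Char) : List Char := (cs.reverse.dropWhile (· == '/')).reverse
-- s.rsplit("/", 1)[-1] = the suffix after the last '/' (the whole of s if no '/')
def pvLastSeg (cs : List Char) : List Char := (cs.reverse.takeWhile (· != '/')).reverse
-- s.split("/", 1)[0] = the prefix before the first '/' (the whole of s if no '/')
def pvFirstSeg (cs : List Char) : List Char := cs.takeWhile (· != '/')

-- literal port of A: the two-marker for-loop is unrolled (two iterations);
-- cleaned[:idx] / cleaned[idx+len:] use take/drop — exact, idx = find ≥ 0 here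
def detect_worktree_info (cwd : String) : String × Option String :=
  if cwd.toList = [] then ("unknown", none)
  else
    let cleaned := pvRstripSlash cwd.toList
    let m1 := "/.claude/worktrees/".toList
    let idx1 := PySem.Chars.find cleaned m1
    if idx1 ≠ -1 then
      let project := pvLastSeg (cleaned.take idx1.toNat)
      let worktree := pvFirstSeg (cleaned.drop (idx1.toNat + m1.length))
      (if project = [] then "unknown" else String.ofList project,
       if worktree = [] then none else some (String.ofList worktree))
    else
      let m2 := "/.worktrees/".toList
      let idx2 := PySem.Chars.find cleaned m2
      if idx2 ≠ -1 then
        let project := pvLastSeg (cleaned.take idx2.toNat)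
        let worktree := pvFirstSeg (cleaned.drop (idx2.toNat + m2.length))
        (if project = [] then "unknown" else String.ofList project,
         if worktree = [] then none else some (String.ofList worktree))
      else
        let last := pvLastSeg cleaned
        (if last = [] then "unknown" else String.ofList last, none)

-- ===== PORT B =====
-- first pass of Source B: scan segments for  prev / ".claude" / "worktrees" / w
def pvScanCW : List Char → List (List Char) → Option (List Char × List Char)
  | prev, a :: b :: c :: rest =>
      if a = ".claude".toList ∧ b = "worktrees".toList then some (prev, c)
      else pvScanCW a (b :: c :: rest)
  | prev, a :: rest => pvScanCW a rest
  | _, [] => none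

-- second pass of Source B: scan segments for  prev / ".worktrees" / w
def pvScanW : List Char → List (List Char) → Option (List Char × List Char)
  | prev, a :: b :: rest =>
      if a = ".worktrees".toList then some (prev, b)
      else pvScanW a (b :: rest)
  | prev, a :: rest => pvScanW a rest
  | _, [] => none

-- literal port of Source B: cleaned.split("/") is List.splitOn '/'
def detect_worktree_info_alt (cwd : String) : String × Option String :=
  if cwd.toList = [] then ("unknown", none)
  else
    match (pvRstripSlash cwd.toList).splitOn '/' with
    | [] => ("unknown", none)  -- unreachable: split("/") never returns an empty list
    | s0 :: rest =>
      match pvScanCW s0 rest with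
      | some (prev, w) =>
          (if prev = [] then "unknown" else String.ofList prev,
           if w = [] then none else some (String.ofList w))
      | none =>
        match pvScanW s0 rest with
        | some (prev, w) =>
            (if prev = [] then "unknown" else String.ofList prev,
             if w = [] then none else some (String.ofList w))
        | none =>
            let last := (s0 :: rest).getLast (List.cons_ne_nil _ _)
            (if last = [] then "unknown" else String.ofList last, none)

-- ===== PRECONDITION & SPEC =====
def Spec_detect_worktree_info (cwd : String) (out : String × Option String) : Prop := out = detect_worktree_info_alt cwd
instance (cwd : String) (out : String × Option String) : Decidable (Spec_detect_worktree_info cwd out) := by unfold Spec_detect_worktree_info; infer_instance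

-- ===== CLAIM (what is proved, stated in full; the proofs are below) =====
def Claim_equal_detect_worktree_info : Prop := ∀ (cwd : String), Dom_detect_worktree_info cwd → Spec_detect_worktree_info cwd (detect_worktree_info cwd)


-- ===== LEMMAS AND PROOFS =====

-- join segments with '/': the inverse of List.splitOn '/'
def pvJoin : List (List Char) → List Char
  | [] => []
  | [s] => s
  | s :: t :: rest => s ++ '/' :: pvJoin (t :: rest)

-- the marker branch of A, as a function of the cleaned string and the marker
def pvA1 (cs m : List Char) : Option (List Char × List Char) :=
  let i := PySem.Chars.find cs m
  if i = -1 then none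
  else some (pvLastSeg (cs.take i.toNat), pvFirstSeg (cs.drop (i.toNat + m.length)))

lemma pvJoin_cons_ne (s : List Char) (l : List (List Char)) (h : l ≠ []) :
    pvJoin (s :: l) = s ++ '/' :: pvJoin l := by
  cases l with
  | nil => exact absurd rfl h
  | cons t rest => rfl

lemma splitOn_sf (cs : List Char) : ∀ s ∈ cs.splitOn '/', '/' ∉ s := by
  induction cs with
  | nil => intro s hs; simp [List.splitOn, List.splitOnP_nil] at hs; simp [hs]
  | cons c cs ih =>
      intro s hs
      simp only [List.splitOn, List.splitOnP_cons] at hs ih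
      by_cases hc : c = '/'
      · simp [hc] at hs
        rcases hs with h | h
        · simp [h]
        · exact ih s h
      · simp [hc] at hs
        obtain ⟨h, t, he⟩ := List.exists_cons_of_ne_nil (List.splitOnP_ne_nil (· == '/') cs)
        rw [he] at hs
        simp only [List.modifyHead_cons] at hs
        rcases List.mem_cons.mp hs with h1 | h1
        · subst h1
          intro hmem
          rcases List.mem_cons.mp hmem with h2 | h2
          · exact hc h2.symm
          · exact ih h (by rw [he]; exact List.mem_cons_self) h2
        · exact ih s (by rw [he]; exact List.mem_cons_of_mem _ h1)

lemma pvJoin_splitOn (cs : List Char) : pvJoin (cs.splitOn '/') = cs := by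
  induction cs with
  | nil => simp [List.splitOn, List.splitOnP_nil, pvJoin]
  | cons c cs ih =>
      simp only [List.splitOn, List.splitOnP_cons] at ih ⊢
      by_cases hc : c = '/'
      · simp only [hc, beq_self_eq_true, if_true]
        rw [pvJoin_cons_ne _ _ (List.splitOnP_ne_nil _ _)]
        simp [ih]
      · simp only [beq_iff_eq, hc, if_false]
        obtain ⟨h, t, he⟩ := List.exists_cons_of_ne_nil (List.splitOnP_ne_nil (· == '/') cs)
        rw [he]
        simp only [List.modifyHead_cons]
        rw [he] at ih
        cases t with
        | nil => simpa [pvJoin] using congrArg (c :: ·) ih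
        | cons t2 rest =>
            show (c :: h) ++ '/' :: pvJoin (t2 :: rest) = c :: cs
            rw [show pvJoin (h :: t2 :: rest) = h ++ '/' :: pvJoin (t2 :: rest) from rfl] at ih
            simp [← ih]

lemma takeWhile_all (l : List Char) (h : ∀ c ∈ l, (c != '/') = true) :
    List.takeWhile (· != '/') l = l := by
  induction l with
  | nil => rfl
  | cons c cs ih =>
      simp only [List.takeWhile_cons, h c (by simp)]
      simp only [if_true]
      rw [ih (fun c hc => h c (by simp [hc]))]

lemma takeWhile_append_stop (u w : List Char) (b : Char) (hb : (b != '/') = false) :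
    List.takeWhile (· != '/') (u ++ b :: w) = List.takeWhile (· != '/') u := by
  induction u with
  | nil => simp [hb]
  | cons c cs ih =>
      simp only [List.cons_append, List.takeWhile_cons]
      by_cases h : (c != '/') = true <;> simp [h, ih]

lemma pvLastSeg_sf (s : List Char) (hs : '/' ∉ s) : pvLastSeg s = s := by
  unfold pvLastSeg
  rw [takeWhile_all]
  · simp
  · intro c hc
    simp only [bne_iff_ne, ne_eq]
    intro h; subst h; exact hs (List.mem_reverse.mp hc)

lemma pvLastSeg_append (s X : List Char) : pvLastSeg (s ++ '/' :: X) = pvLastSeg X := by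
  unfold pvLastSeg
  rw [List.reverse_append, List.reverse_cons, List.append_assoc]
  rw [show X.reverse ++ (['/'] ++ s.reverse) = X.reverse ++ '/' :: s.reverse from by simp]
  rw [takeWhile_append_stop _ _ _ (by simp)]

lemma pvFirstSeg_sf (s : List Char) (hs : '/' ∉ s) : pvFirstSeg s = s := by
  unfold pvFirstSeg
  apply takeWhile_all
  intro c hc
  simp only [bne_iff_ne, ne_eq]
  intro h; subst h; exact hs hc

lemma pvFirstSeg_join (c : List Char) (rr : List (List Char)) (hc : '/' ∉ c) :
    pvFirstSeg (pvJoin (c :: rr)) = c := by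
  cases rr with
  | nil => exact pvFirstSeg_sf c hc
  | cons r rr' =>
      rw [pvJoin_cons_ne _ _ (by simp)]
      unfold pvFirstSeg
      rw [takeWhile_append_stop _ _ _ (by simp)]
      exact takeWhile_all c (fun x hx => by
        simp only [bne_iff_ne, ne_eq]; intro h; subst h; exact hc hx)

lemma find_spec_of_ne (cs m : List Char) (h : PySem.Chars.find cs m ≠ -1) :
    0 ≤ PySem.Chars.find cs m ∧ m <+: cs.drop (PySem.Chars.find cs m).toNat ∧
      ∀ i : Nat, i < (PySem.Chars.find cs m).toNat → ¬ m <+: cs.drop i := by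
  have h0 := PySem.Chars.findFrom_natCast_spec cs m 0 (Nat.zero_le _)
  rw [show ((0 : Nat) : Int) = 0 from rfl, PySem.Chars.findFrom_zero] at h0
  obtain ⟨h1, h2, h3⟩ := h0 h
  exact ⟨h1, h2, fun i hi => h3 i (Nat.zero_le _) hi⟩

lemma find_eq_of_min (cs m : List Char) (p : Nat)
    (h1 : m <+: cs.drop p) (h2 : ∀ i < p, ¬ m <+: cs.drop i) :
    PySem.Chars.find cs m = (p : Int) := by
  have hne : PySem.Chars.find cs m ≠ -1 := by
    rw [PySem.Chars.find_ne_neg_one_iff]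
    exact List.IsInfix.trans h1.isInfix (List.drop_suffix p cs).isInfix
  obtain ⟨hge, hpre, hmin⟩ := find_spec_of_ne cs m hne
  have hq : (PySem.Chars.find cs m).toNat = p := by
    rcases Nat.lt_trichotomy (PySem.Chars.find cs m).toNat p with h | h | h
    · exact absurd hpre (h2 _ h)
    · exact h
    · exact absurd h1 (hmin p h)
  omega

lemma find_sf (s m : List Char) (hs : '/' ∉ s) (hm : '/' ∈ m) :
    PySem.Chars.find s m = -1 := by
  rw [PySem.Chars.find_eq_neg_one_iff]
  intro hinf
  exact hs (hinf.subset hm)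

lemma no_match_inside (s t mt : List Char) (hs : '/' ∉ s) (i : Nat) (hi : i < s.length) :
    ¬ ('/' :: mt : List Char) <+: (s ++ '/' :: t).drop i := by
  intro hp
  rw [List.drop_append_of_le_length (by omega), List.drop_eq_getElem_cons hi] at hp
  rw [List.cons_append, List.cons_prefix_cons] at hp
  exact hs (by rw [hp.1]; exact List.getElem_mem _)

lemma drop_boundary (s t : List Char) : (s ++ '/' :: t).drop s.length = '/' :: t :=
  List.drop_left

lemma drop_past (s t : List Char) (k : Nat) :
    (s ++ '/' :: t).drop (s.length + 1 + k) = t.drop k := by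
  rw [List.drop_append]
  rw [List.drop_of_length_le (by omega), show s.length + 1 + k - s.length = 1 + k by omega]
  simp [Nat.add_comm 1 k]

lemma find_seg_cons (s t mt : List Char) (hs : '/' ∉ s) :
    PySem.Chars.find (s ++ '/' :: t) ('/' :: mt) =
      if ('/' :: mt : List Char) <+: ('/' :: t) then (s.length : Int)
      else if PySem.Chars.find t ('/' :: mt) = -1 then -1
      else (s.length + 1 : Int) + PySem.Chars.find t ('/' :: mt) := by
  split_ifs with hpre hnone
  · apply find_eq_of_min
    · rw [drop_boundary]; exact hpre
    · exact fun i hi => no_match_inside s t mt hs i hi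
  · rw [PySem.Chars.find_eq_neg_one_iff]
    intro hinf
    obtain ⟨j, hj⟩ := (PySem.Chars.exists_prefix_drop_iff_isIn _ _).mpr
      ((PySem.Chars.isIn_iff_infix _ _).mpr hinf)
    rcases Nat.lt_trichotomy j s.length with h | h | h
    · exact no_match_inside s t mt hs j h hj
    · subst h; rw [drop_boundary] at hj; exact hpre hj
    · have hj' : ('/' :: mt : List Char) <+: t.drop (j - s.length - 1) := by
        rw [← drop_past s t (j - s.length - 1)]
        convert hj using 2
        omega
      rw [PySem.Chars.find_eq_neg_one_iff] at hnone
      exact hnone (List.IsInfix.trans hj'.isInfix (List.drop_suffix _ t).isInfix)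
  · obtain ⟨hge, hpre2, hmin⟩ := find_spec_of_ne t _ hnone
    set q := (PySem.Chars.find t ('/' :: mt)).toNat with hqdef
    have : PySem.Chars.find (s ++ '/' :: t) ('/' :: mt) = ((s.length + 1 + q : Nat) : Int) := by
      apply find_eq_of_min
      · rw [drop_past]; exact hpre2
      · intro i hi hp
        rcases Nat.lt_trichotomy i s.length with h | h | h
        · exact no_match_inside s t mt hs i h hp
        · subst h; rw [drop_boundary] at hp; exact hpre hp
        · have : ('/' :: mt : List Char) <+: t.drop (i - s.length - 1) := by
            rw [← drop_past s t (i - s.length - 1)]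
            convert hp using 2
            omega
          exact hmin (i - s.length - 1) (by omega) this
    rw [this]
    push_cast
    omega

lemma seg_prefix_match (a : List Char) (ha : '/' ∉ a) :
    ∀ r0 u v : List Char, '/' ∉ r0 → (a ++ '/' :: u) <+: (r0 ++ '/' :: v) → a = r0 ∧ u <+: v := by
  induction a with
  | nil =>
      intro r0 u v hr hp
      cases r0 with
      | nil => simpa [List.cons_prefix_cons] using hp
      | cons c r0' =>
          simp only [List.nil_append, List.cons_append, List.cons_prefix_cons] at hp
          exact absurd (by rw [← hp.1]; exact List.mem_cons_self) hr
  | cons c a' ih =>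
      intro r0 u v hr hp
      cases r0 with
      | nil =>
          simp only [List.cons_append, List.nil_append, List.cons_prefix_cons] at hp
          exact absurd (by rw [hp.1]; exact List.mem_cons_self) ha
      | cons d r0' =>
          simp only [List.cons_append, List.cons_prefix_cons] at hp
          obtain ⟨hcd, hp'⟩ := hp
          have := ih (fun h => ha (List.mem_cons_of_mem _ h)) r0' u v
            (fun h => hr (List.mem_cons_of_mem _ h)) hp'
          exact ⟨by rw [hcd, this.1], this.2⟩

lemma seg_prefix_join (a u : List Char) (ha : '/' ∉ a) :
    ∀ segs : List (List Char), (∀ s ∈ segs, '/' ∉ s) →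
      ((a ++ '/' :: u) <+: pvJoin segs ↔ ∃ rest, segs = a :: rest ∧ rest ≠ [] ∧ u <+: pvJoin rest) := by
  intro segs hsf
  constructor
  · intro hp
    cases segs with
    | nil =>
        exfalso
        have := List.IsPrefix.length_le hp
        simp [pvJoin] at this
    | cons r0 rest =>
        cases rest with
        | nil =>
            exfalso
            have hsub : (a ++ ['/'] : List Char) <+: r0 := by
              have h1 : (a ++ ['/'] : List Char) <+: (a ++ '/' :: u) := by
                simp [List.prefix_append_right_inj]
              exact h1.trans hp
            exact hsf r0 List.mem_cons_self (hsub.subset (by simp))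
        | cons r1 rest2 =>
            rw [pvJoin_cons_ne _ _ (by simp)] at hp
            obtain ⟨h1, h2⟩ := seg_prefix_match a ha r0 u (pvJoin (r1 :: rest2))
              (hsf r0 List.mem_cons_self) hp
            exact ⟨r1 :: rest2, by rw [h1], by simp, h2⟩
  · rintro ⟨rest, rfl, hne, hu⟩
    rw [pvJoin_cons_ne _ _ hne]
    simpa [List.prefix_append_right_inj, List.cons_prefix_cons] using hu

lemma tail1_prefix (segs : List (List Char)) (hsf : ∀ s ∈ segs, '/' ∉ s) :
    (".claude/worktrees/".toList <+: pvJoin segs ↔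
      ∃ c rr, segs = ".claude".toList :: "worktrees".toList :: c :: rr) := by
  have hdec : ".claude/worktrees/".toList =
      ".claude".toList ++ '/' :: ("worktrees".toList ++ '/' :: []) := by decide
  rw [hdec, seg_prefix_join _ _ (by decide) segs hsf]
  constructor
  · rintro ⟨rest, rfl, hne, hu⟩
    rw [seg_prefix_join _ _ (by decide) rest
      (fun s hs => hsf s (List.mem_cons_of_mem _ hs))] at hu
    obtain ⟨rest2, rfl, hne2, _⟩ := hu
    obtain ⟨c, rr, rfl⟩ := List.exists_cons_of_ne_nil hne2
    exact ⟨c, rr, rfl⟩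
  · rintro ⟨c, rr, rfl⟩
    refine ⟨_, rfl, by simp, ?_⟩
    rw [seg_prefix_join _ _ (by decide) _
      (fun s hs => hsf s (List.mem_cons_of_mem _ hs))]
    exact ⟨c :: rr, rfl, by simp, List.nil_prefix⟩

lemma tail2_prefix (segs : List (List Char)) (hsf : ∀ s ∈ segs, '/' ∉ s) :
    (".worktrees/".toList <+: pvJoin segs ↔
      ∃ c rr, segs = ".worktrees".toList :: c :: rr) := by
  have hdec : ".worktrees/".toList = ".worktrees".toList ++ '/' :: [] := by decide
  rw [hdec, seg_prefix_join _ _ (by decide) segs hsf]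
  constructor
  · rintro ⟨rest, rfl, hne, _⟩
    obtain ⟨c, rr, rfl⟩ := List.exists_cons_of_ne_nil hne
    exact ⟨c, rr, rfl⟩
  · rintro ⟨c, rr, rfl⟩
    exact ⟨c :: rr, rfl, by simp, List.nil_prefix⟩

lemma scanCW_step (s0 r : List Char) (rest : List (List Char))
    (h : ¬ ∃ c rr, (r :: rest : List (List Char)) = ".claude".toList :: "worktrees".toList :: c :: rr) :
    pvScanCW s0 (r :: rest) = pvScanCW r rest := by
  cases rest with
  | nil => rfl
  | cons b rest2 =>
      cases rest2 with
      | nil => rfl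
      | cons c rest3 =>
          rw [pvScanCW]
          rw [if_neg]
          rintro ⟨h1, h2⟩
          exact h ⟨c, rest3, by rw [h1, h2]⟩

lemma scanW_step (s0 r : List Char) (rest : List (List Char))
    (h : ¬ ∃ c rr, (r :: rest : List (List Char)) = ".worktrees".toList :: c :: rr) :
    pvScanW s0 (r :: rest) = pvScanW r rest := by
  cases rest with
  | nil => rfl
  | cons b rest2 =>
      rw [pvScanW]
      rw [if_neg]
      intro h1
      exact h ⟨b, rest2, by rw [h1]⟩

lemma take_past (s t : List Char) (k : Nat) :
    (s ++ '/' :: t).take (s.length + 1 + k) = s ++ '/' :: t.take k := by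
  rw [List.take_append, List.take_of_length_le (by omega),
    show s.length + 1 + k - s.length = 1 + k by omega]
  simp [Nat.add_comm 1 k]

lemma main1 : ∀ (rest : List (List Char)), (∀ s ∈ rest, '/' ∉ s) →
    ∀ s0 : List Char, '/' ∉ s0 →
      pvA1 (pvJoin (s0 :: rest)) "/.claude/worktrees/".toList = pvScanCW s0 rest := by
  intro rest
  induction rest with
  | nil =>
      intro _ s0 hs0
      show pvA1 s0 _ = _
      rw [pvA1, find_sf s0 _ hs0 (by decide)]
      rfl
  | cons r rest' ih =>
      intro hsf s0 hs0
      have hsf' : ∀ s ∈ r :: rest', '/' ∉ s := hsf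
      have hsfr' : ∀ s ∈ rest', '/' ∉ s := fun s hs => hsf s (List.mem_cons_of_mem _ hs)
      have hr : '/' ∉ r := hsf r List.mem_cons_self
      have hJ : pvJoin (s0 :: r :: rest') = s0 ++ '/' :: pvJoin (r :: rest') := rfl
      have hM : "/.claude/worktrees/".toList = '/' :: ".claude/worktrees/".toList := by decide
      have hfind := find_seg_cons s0 (pvJoin (r :: rest')) ".claude/worktrees/".toList hs0
      simp only [List.cons_prefix_cons, true_and] at hfind
      by_cases hmatch : ".claude/worktrees/".toList <+: pvJoin (r :: rest')
      · obtain ⟨c, rr, hseg⟩ := (tail1_prefix (r :: rest') hsf').mp hmatch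
        rw [if_pos hmatch] at hfind
        rw [hJ, pvA1, hM, hfind, if_neg (by omega),
          show ((s0.length : Int)).toNat = s0.length from by omega,
          show ('/' :: ".claude/worktrees/".toList : List Char).length = 19 from by decide]
        rw [hseg, pvScanCW, if_pos ⟨rfl, rfl⟩]
        rw [show (s0.length + 19) = s0.length + 1 + 18 by omega, drop_past,
          List.take_left, pvLastSeg_sf s0 hs0,
          pvJoin_cons_ne ".claude".toList ("worktrees".toList :: c :: rr) (by simp),
          pvJoin_cons_ne "worktrees".toList (c :: rr) (by simp),
          show (18 : Nat) = (".claude".toList : List Char).length + 1 + 10 from by decide,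
          drop_past,
          show (10 : Nat) = ("worktrees".toList : List Char).length + 1 + 0 from by decide,
          drop_past, List.drop_zero,
          pvFirstSeg_join c rr (hsf' c (by rw [hseg]; simp))]
      · have hnm : ¬ ∃ c rr, (r :: rest' : List (List Char)) =
            ".claude".toList :: "worktrees".toList :: c :: rr := by
          intro hex
          exact hmatch ((tail1_prefix (r :: rest') hsf').mpr hex)
        rw [scanCW_step s0 r rest' hnm, ← ih hsfr' r hr]
        rw [if_neg hmatch] at hfind
        by_cases hnone : PySem.Chars.find (pvJoin (r :: rest')) ('/' :: ".claude/worktrees/".toList) = -1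
        · rw [if_pos hnone] at hfind
          rw [hJ, pvA1, hM, hfind, if_pos rfl, pvA1, hnone, if_pos rfl]
        · rw [if_neg hnone] at hfind
          have hspec := find_spec_of_ne (pvJoin (r :: rest')) _ hnone
          set q := PySem.Chars.find (pvJoin (r :: rest')) ('/' :: ".claude/worktrees/".toList) with hq
          have hq0 : 0 ≤ q := hspec.1
          rw [hJ, pvA1, hM, hfind, if_neg (by omega), pvA1, ← hq, if_neg hnone,
            show (((s0.length : Int) + 1) + q).toNat = s0.length + 1 + q.toNat from by omega]
          rw [show s0.length + 1 + q.toNat + ('/' :: ".claude/worktrees/".toList : List Char).length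
              = s0.length + 1 + (q.toNat + ('/' :: ".claude/worktrees/".toList : List Char).length) from by omega,
            drop_past, take_past, pvLastSeg_append]

lemma main2 : ∀ (rest : List (List Char)), (∀ s ∈ rest, '/' ∉ s) →
    ∀ s0 : List Char, '/' ∉ s0 →
      pvA1 (pvJoin (s0 :: rest)) "/.worktrees/".toList = pvScanW s0 rest := by
  intro rest
  induction rest with
  | nil =>
      intro _ s0 hs0
      show pvA1 s0 _ = _
      rw [pvA1, find_sf s0 _ hs0 (by decide)]
      rfl
  | cons r rest' ih =>
      intro hsf s0 hs0
      have hsf' : ∀ s ∈ r :: rest', '/' ∉ s := hsf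
      have hsfr' : ∀ s ∈ rest', '/' ∉ s := fun s hs => hsf s (List.mem_cons_of_mem _ hs)
      have hr : '/' ∉ r := hsf r List.mem_cons_self
      have hJ : pvJoin (s0 :: r :: rest') = s0 ++ '/' :: pvJoin (r :: rest') := rfl
      have hM : "/.worktrees/".toList = '/' :: ".worktrees/".toList := by decide
      have hfind := find_seg_cons s0 (pvJoin (r :: rest')) ".worktrees/".toList hs0
      simp only [List.cons_prefix_cons, true_and] at hfind
      by_cases hmatch : ".worktrees/".toList <+: pvJoin (r :: rest')
      · obtain ⟨c, rr, hseg⟩ := (tail2_prefix (r :: rest') hsf').mp hmatch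
        rw [if_pos hmatch] at hfind
        rw [hJ, pvA1, hM, hfind, if_neg (by omega),
          show ((s0.length : Int)).toNat = s0.length from by omega,
          show ('/' :: ".worktrees/".toList : List Char).length = 12 from by decide]
        rw [hseg, pvScanW, if_pos rfl]
        rw [show (s0.length + 12) = s0.length + 1 + 11 by omega, drop_past,
          List.take_left, pvLastSeg_sf s0 hs0,
          pvJoin_cons_ne ".worktrees".toList (c :: rr) (by simp),
          show (11 : Nat) = (".worktrees".toList : List Char).length + 1 + 0 from by decide,
          drop_past, List.drop_zero,
          pvFirstSeg_join c rr (hsf' c (by rw [hseg]; simp))]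
      · have hnm : ¬ ∃ c rr, (r :: rest' : List (List Char)) =
            ".worktrees".toList :: c :: rr := by
          intro hex
          exact hmatch ((tail2_prefix (r :: rest') hsf').mpr hex)
        rw [scanW_step s0 r rest' hnm, ← ih hsfr' r hr]
        rw [if_neg hmatch] at hfind
        by_cases hnone : PySem.Chars.find (pvJoin (r :: rest')) ('/' :: ".worktrees/".toList) = -1
        · rw [if_pos hnone] at hfind
          rw [hJ, pvA1, hM, hfind, if_pos rfl, pvA1, hnone, if_pos rfl]
        · rw [if_neg hnone] at hfind
          have hspec := find_spec_of_ne (pvJoin (r :: rest')) _ hnone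
          set q := PySem.Chars.find (pvJoin (r :: rest')) ('/' :: ".worktrees/".toList) with hq
          have hq0 : 0 ≤ q := hspec.1
          rw [hJ, pvA1, hM, hfind, if_neg (by omega), pvA1, ← hq, if_neg hnone,
            show (((s0.length : Int) + 1) + q).toNat = s0.length + 1 + q.toNat from by omega]
          rw [show s0.length + 1 + q.toNat + ('/' :: ".worktrees/".toList : List Char).length
              = s0.length + 1 + (q.toNat + ('/' :: ".worktrees/".toList : List Char).length) from by omega,
            drop_past, take_past, pvLastSeg_append]

lemma mainF : ∀ (rest : List (List Char)), (∀ s ∈ rest, '/' ∉ s) →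
    ∀ s0 : List Char, '/' ∉ s0 →
      pvLastSeg (pvJoin (s0 :: rest)) = (s0 :: rest).getLast (List.cons_ne_nil _ _) := by
  intro rest
  induction rest with
  | nil => intro _ s0 hs0; exact pvLastSeg_sf s0 hs0
  | cons r rest' ih =>
      intro hsf s0 hs0
      rw [pvJoin_cons_ne _ _ (by simp), pvLastSeg_append,
        ih (fun s hs => hsf s (List.mem_cons_of_mem _ hs)) r (hsf r List.mem_cons_self)]
      exact (List.getLast_cons _).symm

-- ===== VERDICT (by name: the statement is the Claim_ definition above) =====
theorem detect_worktree_info_spec : Claim_equal_detect_worktree_info := by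
  unfold Claim_equal_detect_worktree_info
  intro cwd _
  unfold Spec_detect_worktree_info
  by_cases hnil : cwd.toList = []
  · unfold detect_worktree_info detect_worktree_info_alt
    rw [if_pos hnil, if_pos hnil]
  · have hsegne : (pvRstripSlash cwd.toList).splitOn '/' ≠ [] := List.splitOnP_ne_nil _ _
    obtain ⟨s0, rest, hsegs⟩ := List.exists_cons_of_ne_nil hsegne
    have hsf0 := splitOn_sf (pvRstripSlash cwd.toList)
    rw [hsegs] at hsf0
    have hs0 : '/' ∉ s0 := hsf0 s0 List.mem_cons_self
    have hrest : ∀ s ∈ rest, '/' ∉ s := fun s hs => hsf0 s (List.mem_cons_of_mem _ hs)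
    have hjoin : pvJoin (s0 :: rest) = pvRstripSlash cwd.toList := by
      rw [← hsegs]; exact pvJoin_splitOn _
    have h1 : pvA1 (pvRstripSlash cwd.toList) "/.claude/worktrees/".toList = pvScanCW s0 rest := by
      rw [← hjoin]; exact main1 rest hrest s0 hs0
    have h2 : pvA1 (pvRstripSlash cwd.toList) "/.worktrees/".toList = pvScanW s0 rest := by
      rw [← hjoin]; exact main2 rest hrest s0 hs0
    have hF : pvLastSeg (pvRstripSlash cwd.toList) = (s0 :: rest).getLast (List.cons_ne_nil _ _) := by
      rw [← hjoin]; exact mainF rest hrest s0 hs0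
    simp only [pvA1] at h1 h2
    have e1 : ("/.claude/worktrees/".toList : List Char) = ['/', '.', 'c', 'l', 'a', 'u', 'd', 'e', '/', 'w', 'o', 'r', 'k', 't', 'r', 'e', 'e', 's', '/'] := rfl
    have e2 : ("/.worktrees/".toList : List Char) = ['/', '.', 'w', 'o', 'r', 'k', 't', 'r', 'e', 'e', 's', '/'] := rfl
    rw [e1] at h1
    rw [e2] at h2
    simp only [detect_worktree_info, detect_worktree_info_alt, if_neg hnil, hsegs]
    by_cases hf1 : PySem.Chars.find (pvRstripSlash cwd.toList) ['/', '.', 'c', 'l', 'a', 'u', 'd', 'e', '/', 'w', 'o', 'r', 'k', 't', 'r', 'e', 'e', 's', '/'] = -1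
    · rw [if_pos hf1] at h1
      by_cases hf2 : PySem.Chars.find (pvRstripSlash cwd.toList) ['/', '.', 'w', 'o', 'r', 'k', 't', 'r', 'e', 'e', 's', '/'] = -1
      · rw [if_pos hf2] at h2
        simp [hf1, hf2, ← h1, ← h2, hF]
      · rw [if_neg hf2] at h2
        simp [hf1, hf2, ← h1, ← h2]
    · rw [if_neg hf1] at h1
      simp [hf1, ← h1]
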